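-- pv_equiv track=rewrite | github.com/breezy-team/breezy | breezy/tests/blackbox/test_selftest.py | _parse_test_list
-- ===== SOURCE A (Python) =====
-- def _parse_test_list(lines, newlines_in_header=0):
--     """Parse a list of lines into a tuple of 3 lists (header,body,footer)."""
--     in_header = newlines_in_header != 0
--     in_footer = False
--     header = []
--     body = []
--     footer = []
--     header_newlines_found = 0
--     for line in lines:
--         if in_header:
--             if line == "":
--                 header_newlines_found += 1
--                 if header_newlines_found >= newlines_in_header:
--                     in_header = False
--                     continue
--             header.append(line)
--         elif not in_footer:
--             if line.startswith("-------"):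
--                 in_footer = True
--             else:
--                 body.append(line)
--         else:
--             footer.append(line)
--     # If the last body line is blank, drop it off the list
--     if len(body) > 0 and body[-1] == "":
--         body.pop()
--     return (header, body, footer)
-- ===== SOURCE B (Python) =====
-- def _parse_test_list(lines, newlines_in_header=0):
--     """Parse a list of lines into a tuple of 3 lists (header,body,footer)."""
--     # Phase 1: header = everything before the k-th blank line (k = max(N,1)),
--     # the k-th blank itself is dropped; if there is no such blank, all lines
--     # are header.  N == 0 means no header at all.
--     if newlines_in_header == 0:
--         header, rest = [], lines
--     else:
--         k = max(newlines_in_header, 1)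
--         idx = None
--         for i, line in enumerate(lines):
--             if line == "":
--                 k -= 1
--                 if k <= 0:
--                     idx = i
--                     break
--         if idx is None:
--             header, rest = list(lines), []
--         else:
--             header, rest = lines[:idx], lines[idx + 1:]
--     # Phase 2: split the remainder at the first separator line.
--     sep = None
--     for i, line in enumerate(rest):
--         if line.startswith("-------"):
--             sep = i
--             break
--     if sep is None:
--         body, footer = list(rest), []
--     else:
--         body, footer = rest[:sep], rest[sep + 1:]
--     # Drop a single trailing blank body line.
--     if body and body[-1] == "":
--         body.pop()
--     return (header, body, footer)
-- ===== Notes on version B (the rewrite author's own statement) =====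
-- stated objective: alternative
-- what changed: Replaces A's single flag-driven state-machine pass with a boundary computation: find the index of the Nth blank line and of the first '-------' line, then obtain header/body/footer by slicing.
import Mathlib
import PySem

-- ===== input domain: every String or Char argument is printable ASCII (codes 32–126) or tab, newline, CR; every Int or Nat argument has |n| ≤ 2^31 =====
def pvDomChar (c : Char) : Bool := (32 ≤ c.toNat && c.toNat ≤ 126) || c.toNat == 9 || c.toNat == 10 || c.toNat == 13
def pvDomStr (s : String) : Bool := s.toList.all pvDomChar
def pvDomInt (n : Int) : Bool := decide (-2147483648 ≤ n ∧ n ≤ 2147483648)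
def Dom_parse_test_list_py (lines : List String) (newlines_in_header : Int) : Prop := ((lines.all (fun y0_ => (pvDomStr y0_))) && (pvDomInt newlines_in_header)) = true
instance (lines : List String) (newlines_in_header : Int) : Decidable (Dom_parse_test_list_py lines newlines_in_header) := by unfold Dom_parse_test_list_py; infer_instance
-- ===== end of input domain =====

-- B replaces A's single flag-driven pass by a boundary computation: find the index of
-- the Nth blank line and of the first '-------' line, then slice (objective: alternative).

-- ===== PORT A =====
-- loop state: (in_header, in_footer, header, body, footer, header_newlines_found)
def pvAState : Type := Bool × Bool × List String × List String × List String × Int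

def pvAStep (N : Int) (st : pvAState) (line : String) : pvAState :=
  let (in_header, in_footer, header, body, footer, cnt) := st
  if in_header then
    if line = "" then
      let cnt := cnt + 1
      if cnt ≥ N then (false, in_footer, header, body, footer, cnt)
      else (in_header, in_footer, header ++ [line], body, footer, cnt)
    else (in_header, in_footer, header ++ [line], body, footer, cnt)
  else if !in_footer then
    if PySem.Str.startswith line "-------" then (in_header, true, header, body, footer, cnt)
    else (in_header, in_footer, header, body ++ [line], footer, cnt)
  else (in_header, in_footer, header, body, footer ++ [line], cnt)

def parse_test_list_py (lines : List String) (newlines_in_header : Int) : List String × List String × List String :=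
  let st := lines.foldl (pvAStep newlines_in_header)
      (decide (newlines_in_header ≠ 0), false, [], [], [], 0)
  let (_, _, header, body, footer, _) := st
  -- if len(body) > 0 and body[-1] == "": body.pop()
  let body := if body ≠ [] ∧ body.getLast? = some "" then body.dropLast else body
  (header, body, footer)

-- ===== PORT B =====
-- index of the k-th blank line (k ≥ 1), scanning left to right
def pvNthBlank : List String → Nat → Option Nat
  | [], _ => none
  | l :: ls, k =>
    if l = "" then
      if k ≤ 1 then some 0 else (pvNthBlank ls (k - 1)).map (· + 1)
    else (pvNthBlank ls k).map (· + 1)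

-- index of the first line starting with '-------'
def pvSepIdx : List String → Option Nat
  | [] => none
  | l :: ls =>
    if PySem.Str.startswith l "-------" then some 0 else (pvSepIdx ls).map (· + 1)

def parse_test_list_py_alt (lines : List String) (newlines_in_header : Int) : List String × List String × List String :=
  let (header, rest) :=
    if newlines_in_header = 0 then (([] : List String), lines)
    else
      match pvNthBlank lines (max newlines_in_header 1).toNat with
      | some i => (lines.take i, lines.drop (i + 1))
      | none => (lines, [])
  let (body, footer) :=
    match pvSepIdx rest with
    | some s => (rest.take s, rest.drop (s + 1))
    | none => (rest, ([] : List String))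
  -- if body and body[-1] == "": body.pop()
  let body := if body ≠ [] ∧ body.getLast? = some "" then body.dropLast else body
  (header, body, footer)

-- ===== PRECONDITION & SPEC =====
def Spec_parse_test_list_py (lines : List String) (newlines_in_header : Int) (out : List String × List String × List String) : Prop := out = parse_test_list_py_alt lines newlines_in_header
instance (lines : List String) (newlines_in_header : Int) (out : List String × List String × List String) : Decidable (Spec_parse_test_list_py lines newlines_in_header out) := by unfold Spec_parse_test_list_py; infer_instance

-- ===== CLAIM (what is proved, stated in full; the proofs are below) =====
def Claim_equal_parse_test_list_py : Prop := ∀ (lines : List String) (newlines_in_header : Int), Dom_parse_test_list_py lines newlines_in_header → Spec_parse_test_list_py lines newlines_in_header (parse_test_list_py lines newlines_in_header)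

-- ===== LEMMAS AND PROOFS =====

-- footer phase: once in_footer, every remaining line is appended to footer
theorem pv_footer_phase (N : Int) (xs : List String) : ∀ (h b f : List String) (c : Int),
    xs.foldl (pvAStep N) (false, true, h, b, f, c) = (false, true, h, b, f ++ xs, c) := by
  induction xs with
  | nil => intro h b f c; simp
  | cons x xs ih =>
    intro h b f c
    simp only [List.foldl_cons, pvAStep]
    simpa using ih h b (f ++ [x]) c

-- body phase: splits the remainder at the first separator line
theorem pv_body_phase (N : Int) (rest : List String) : ∀ (h b : List String) (c : Int),
    rest.foldl (pvAStep N) (false, false, h, b, [], c) =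
      match pvSepIdx rest with
      | some s => (false, true, h, b ++ rest.take s, rest.drop (s + 1), c)
      | none => (false, false, h, b ++ rest, [], c) := by
  induction rest with
  | nil => intro h b c; simp [pvSepIdx]
  | cons x xs ih =>
    intro h b c
    simp only [List.foldl_cons]
    rw [pvAStep.eq_def, pvSepIdx.eq_def]
    cases hx : PySem.Str.startswith x "-------" with
    | true =>
      simp only [hx, Bool.false_eq_true, if_false, if_true, Bool.not_false, ite_true]
      rw [pv_footer_phase]
      simp
    | false =>
      simp only [hx, Bool.false_eq_true, ite_false, Bool.not_false, ite_true]
      rw [ih (h) (b ++ [x]) c]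
      cases hs : pvSepIdx xs with
      | none => simp [hs]
      | some s => simp [hs]

-- header phase, exiting case: the K-th blank line ends the header
theorem pv_header_some (N : Int) (lines : List String) : ∀ (h : List String) (c : Int) (i : Nat),
    pvNthBlank lines (max (N - c) 1).toNat = some i →
    ∃ c', lines.foldl (pvAStep N) (true, false, h, [], [], c) =
      (lines.drop (i + 1)).foldl (pvAStep N) (false, false, h ++ lines.take i, [], [], c') := by
  induction lines with
  | nil => intro h c i hn; simp [pvNthBlank] at hn
  | cons l ls ih =>
    intro h c i hn
    simp only [pvNthBlank] at hn
    simp only [List.foldl_cons, pvAStep]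
    by_cases hl : l = ""
    · subst hl
      rw [if_pos rfl] at hn
      simp only [if_pos rfl]
      split at hn
      · next hk =>
        obtain rfl : i = 0 := by injection hn; omega
        have hc : c + 1 ≥ N := by omega
        rw [if_pos hc]
        exact ⟨c + 1, by simp⟩
      · next hk =>
        rw [Option.map_eq_some_iff] at hn
        obtain ⟨j, hj, rfl⟩ := hn
        have hc : ¬ (c + 1 ≥ N) := by omega
        rw [if_neg hc]
        have hkk : (max (N - (c + 1)) 1).toNat = (max (N - c) 1).toNat - 1 := by omega
        obtain ⟨c', hfold⟩ := ih (h ++ [""]) (c + 1) j (by rw [hkk]; exact hj)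
        exact ⟨c', by simpa [List.take_succ_cons] using hfold⟩
    · rw [if_neg hl] at hn
      rw [if_neg hl]
      rw [Option.map_eq_some_iff] at hn
      obtain ⟨j, hj, rfl⟩ := hn
      obtain ⟨c', hfold⟩ := ih (h ++ [l]) c j hj
      exact ⟨c', by simpa [List.take_succ_cons] using hfold⟩

-- header phase, non-exiting case: fewer than K blank lines, everything is header
theorem pv_header_none (N : Int) (lines : List String) : ∀ (h : List String) (c : Int),
    pvNthBlank lines (max (N - c) 1).toNat = none →
    ∃ c', lines.foldl (pvAStep N) (true, false, h, [], [], c) = (true, false, h ++ lines, [], [], c') := by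
  induction lines with
  | nil => intro h c _; exact ⟨c, by simp⟩
  | cons l ls ih =>
    intro h c hn
    simp only [pvNthBlank] at hn
    simp only [List.foldl_cons, pvAStep]
    by_cases hl : l = ""
    · subst hl
      rw [if_pos rfl] at hn
      simp only [if_pos rfl]
      split at hn
      · exact absurd hn (by simp)
      · next hk =>
        rw [Option.map_eq_none_iff] at hn
        have hc : ¬ (c + 1 ≥ N) := by omega
        rw [if_neg hc]
        have hkk : (max (N - (c + 1)) 1).toNat = (max (N - c) 1).toNat - 1 := by omega
        obtain ⟨c', hfold⟩ := ih (h ++ [""]) (c + 1) (by rw [hkk]; exact hn)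
        exact ⟨c', by simpa using hfold⟩
    · rw [if_neg hl] at hn
      rw [if_neg hl]
      rw [Option.map_eq_none_iff] at hn
      obtain ⟨c', hfold⟩ := ih (h ++ [l]) c hn
      exact ⟨c', by simpa using hfold⟩

-- ===== VERDICT (by name: the statement is the Claim_ definition above) =====
theorem parse_test_list_py_spec : Claim_equal_parse_test_list_py := by
  intro lines N _
  show parse_test_list_py lines N = parse_test_list_py_alt lines N
  by_cases hN : N = 0
  · subst hN
    simp only [parse_test_list_py, parse_test_list_py_alt, if_pos rfl, decide_eq_true_eq,
      ne_eq, not_true_eq_false, decide_false]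
    rw [pv_body_phase]
    cases hs : pvSepIdx lines with
    | some s => simp [hs]
    | none => simp [hs]
  · simp only [parse_test_list_py, parse_test_list_py_alt, if_neg hN, ne_eq, hN,
      not_false_eq_true, decide_true]
    have hmax : (max (N - 0) 1).toNat = (max N 1).toNat := by omega
    cases hb : pvNthBlank lines (max N 1).toNat with
    | some i =>
      obtain ⟨c', hfold⟩ := pv_header_some N lines [] 0 i (by rw [hmax]; exact hb)
      rw [hfold, pv_body_phase]
      cases hs : pvSepIdx (lines.drop (i + 1)) with
      | some s => simp [hs]
      | none => simp [hs]
    | none =>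
      obtain ⟨c', hfold⟩ := pv_header_none N lines [] 0 (by rw [hmax]; exact hb)
      rw [hfold]
      simp [pvSepIdx]
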